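-- pv_equiv track=rewrite | github.com/Devbijwe/Password-Strength-Checker-Classifications | app.py | count_and_list_characters
-- ===== SOURCE A (Python) =====
-- def count_and_list_characters(password):
--     characters = {
--         'digits': [i+1 for i, char in enumerate(password) if char.isdigit()],
--         'characters': [i+1 for i, char in enumerate(password) if char.isalpha()],
--         'special_characters': [i+1 for i, char in enumerate(password) if not char.isalnum() and not char.isspace()],
--         'spaces': [i+1 for i, char in enumerate(password) if char.isspace()],
--     }
--     counts = {key: len(value) for key, value in characters.items()}
--     return counts, characters
-- ===== SOURCE B (Python) =====
-- def count_and_list_characters(password):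
--     # Simpler decomposition: one pass over the string classifying each
--     # character once, instead of four separate comprehension passes.
--     digits, chars, specials, spaces = [], [], [], []
--     for i, ch in enumerate(password):
--         if ch.isdigit():
--             digits.append(i + 1)
--         elif ch.isalpha():
--             chars.append(i + 1)
--         elif ch.isspace():
--             spaces.append(i + 1)
--         elif not ch.isalnum():
--             specials.append(i + 1)
--     characters = {
--         'digits': digits,
--         'characters': chars,
--         'special_characters': specials,
--         'spaces': spaces,
--     }
--     counts = {key: len(value) for key, value in characters.items()}
--     return counts, characters
-- ===== Notes on version B (the rewrite author's own statement) =====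
-- stated objective: simpler
-- what changed: Replaces four separate filtering comprehensions over enumerate(password) with a single classification loop that assigns each character's position to exactly one of the four lists in one pass.
import Mathlib
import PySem

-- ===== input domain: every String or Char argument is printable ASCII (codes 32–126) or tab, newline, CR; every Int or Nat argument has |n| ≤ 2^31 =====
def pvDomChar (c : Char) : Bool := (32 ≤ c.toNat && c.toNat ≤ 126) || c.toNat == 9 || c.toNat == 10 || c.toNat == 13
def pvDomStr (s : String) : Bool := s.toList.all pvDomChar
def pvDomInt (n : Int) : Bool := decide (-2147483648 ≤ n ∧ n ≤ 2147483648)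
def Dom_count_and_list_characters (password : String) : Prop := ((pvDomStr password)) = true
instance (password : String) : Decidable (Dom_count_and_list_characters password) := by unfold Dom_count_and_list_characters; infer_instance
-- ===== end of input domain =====

-- B replaces A's four filtering comprehension passes with a single classification
-- loop over enumerate(password); objective: simpler (one pass, same cost class).

-- ===== PORT A =====
def count_and_list_characters (password : String) : (List (String × Int)) × (List (String × List Int)) :=
  let e := PySem.List.enumerate password.toList 0
  let characters : List (String × List Int) :=
    [("digits", (e.filter (fun p => PySem.Chars.isdigit p.2)).map (fun p => p.1 + 1)),
     ("characters", (e.filter (fun p => PySem.Chars.isalpha p.2)).map (fun p => p.1 + 1)),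
     ("special_characters", (e.filter (fun p => !PySem.Chars.isalnum p.2 && !PySem.Chars.isspace p.2)).map (fun p => p.1 + 1)),
     ("spaces", (e.filter (fun p => PySem.Chars.isspace p.2)).map (fun p => p.1 + 1))]
  let counts : List (String × Int) := characters.map (fun kv => (kv.1, (kv.2.length : Int)))
  (counts, characters)

-- ===== PORT B =====
-- one classification step of B's loop; state = (digits, chars, spaces, specials)
def pvClassStep (acc : List Int × List Int × List Int × List Int) (p : Int × Char) :
    List Int × List Int × List Int × List Int :=
  if PySem.Chars.isdigit p.2 then (acc.1 ++ [p.1 + 1], acc.2.1, acc.2.2.1, acc.2.2.2)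
  else if PySem.Chars.isalpha p.2 then (acc.1, acc.2.1 ++ [p.1 + 1], acc.2.2.1, acc.2.2.2)
  else if PySem.Chars.isspace p.2 then (acc.1, acc.2.1, acc.2.2.1 ++ [p.1 + 1], acc.2.2.2)
  else if !PySem.Chars.isalnum p.2 then (acc.1, acc.2.1, acc.2.2.1, acc.2.2.2 ++ [p.1 + 1])
  else acc

def count_and_list_characters_alt (password : String) : (List (String × Int)) × (List (String × List Int)) :=
  let r := (PySem.List.enumerate password.toList 0).foldl pvClassStep ([], [], [], [])
  let characters : List (String × List Int) :=
    [("digits", r.1), ("characters", r.2.1), ("special_characters", r.2.2.2), ("spaces", r.2.2.1)]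
  let counts : List (String × Int) := characters.map (fun kv => (kv.1, (kv.2.length : Int)))
  (counts, characters)

-- ===== PRECONDITION & SPEC =====
def Spec_count_and_list_characters (password : String) (out : (List (String × Int)) × (List (String × List Int))) : Prop := out = count_and_list_characters_alt password
instance (password : String) (out : (List (String × Int)) × (List (String × List Int))) : Decidable (Spec_count_and_list_characters password out) := by unfold Spec_count_and_list_characters; infer_instance

-- ===== CLAIM (what is proved, stated in full; the proofs are below) =====
def Claim_equal_count_and_list_characters : Prop := ∀ (password : String), Dom_count_and_list_characters password → Spec_count_and_list_characters password (count_and_list_characters password)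

-- ===== LEMMAS AND PROOFS =====
theorem pv_digit_not_alpha (c : Char) : PySem.Chars.isdigit c = true → PySem.Chars.isalpha c = false := by
  simp [PySem.Chars.isdigit, PySem.Chars.isalpha, PySem.Chars.isupper, PySem.Chars.islower,
        Char.le_def, UInt32.le_iff_toNat_le]
  omega

theorem pv_digit_not_space (c : Char) : PySem.Chars.isdigit c = true → PySem.Chars.isspace c = false := by
  simp [PySem.Chars.isdigit, PySem.Chars.isspace, Char.le_def, UInt32.le_iff_toNat_le]
  omega

theorem pv_alpha_not_space (c : Char) : PySem.Chars.isalpha c = true → PySem.Chars.isspace c = false := by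
  simp [PySem.Chars.isalpha, PySem.Chars.isupper, PySem.Chars.islower, PySem.Chars.isspace,
        Char.le_def, UInt32.le_iff_toNat_le]
  omega

theorem pv_alnum_or (c : Char) : PySem.Chars.isalnum c = (PySem.Chars.isdigit c || PySem.Chars.isalpha c) := by
  simp [PySem.Chars.isalnum, PySem.Chars.isdigit, PySem.Chars.isalpha]
  ac_rfl

-- loop invariant: B's single pass accumulates exactly A's four filtered/mapped lists
theorem pvClassStep_inv (l : List (Int × Char)) (d c sp spec : List Int) :
    l.foldl pvClassStep (d, c, sp, spec) =
      (d ++ (l.filter (fun p => PySem.Chars.isdigit p.2)).map (fun p => p.1 + 1),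
       c ++ (l.filter (fun p => PySem.Chars.isalpha p.2)).map (fun p => p.1 + 1),
       sp ++ (l.filter (fun p => PySem.Chars.isspace p.2)).map (fun p => p.1 + 1),
       spec ++ (l.filter (fun p => !PySem.Chars.isalnum p.2 && !PySem.Chars.isspace p.2)).map (fun p => p.1 + 1)) := by
  induction l generalizing d c sp spec with
  | nil => simp
  | cons p l ih =>
    simp only [List.foldl_cons, List.filter_cons]
    by_cases hd : PySem.Chars.isdigit p.2 = true
    · simp [pvClassStep, hd, pv_digit_not_alpha p.2 hd, pv_digit_not_space p.2 hd,
            pv_alnum_or, ih]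
    · by_cases ha : PySem.Chars.isalpha p.2 = true
      · simp [pvClassStep, hd, ha, pv_alpha_not_space p.2 ha, pv_alnum_or, ih]
      · by_cases hs : PySem.Chars.isspace p.2 = true
        · simp [pvClassStep, hd, ha, hs, ih]
        · by_cases hn : PySem.Chars.isalnum p.2 = true
          · simp [pvClassStep, hd, ha, hs, hn, pv_alnum_or, ih] at *
          · simp [pvClassStep, hd, ha, hs, hn, ih]

-- ===== VERDICT (by name: the statement is the Claim_ definition above) =====
theorem count_and_list_characters_spec : Claim_equal_count_and_list_characters := by
  intro password _
  unfold Spec_count_and_list_characters count_and_list_characters count_and_list_characters_alt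
  rw [pvClassStep_inv]
  simp
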